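-- pv_equiv track=rewrite | github.com/alexezh/foolpy | asearch.py | apply_parenthesis
-- ===== SOURCE A (Python) =====
-- def apply_parenthesis(tokens):
--     # Evaluate expressions in parentheses if they reduce to a single token
--     for i in range(len(tokens)):
--         if tokens[i] == '(':
--             for j in range(i+2, len(tokens)):
--                 if tokens[j] == ')':
--                     subexpr = tokens[i+1:j]
--                     if len(subexpr) == 1:
--                         new_tokens = tokens[:i] + subexpr + tokens[j+1:]
--                         return new_tokens
--     return None
-- ===== SOURCE B (Python) =====
-- def apply_parenthesis(tokens):
--     # Single linear scan: a parenthesis group reduces to a single token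
--     # exactly when tokens[i] == '(' and tokens[i+2] == ')'.
--     for i in range(len(tokens) - 2):
--         if tokens[i] == '(' and tokens[i + 2] == ')':
--             return tokens[:i] + [tokens[i + 1]] + tokens[i + 3:]
--     return None
-- ===== Notes on version B (the rewrite author's own statement) =====
-- stated objective: simpler
-- what changed: Replaced the nested scan (for each '(' search forward for a ')' and test the slice length) by one linear pass that checks tokens[i]=='(' and tokens[i+2]==')' directly, since only a width-3 window can ever succeed.
import Mathlib
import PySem

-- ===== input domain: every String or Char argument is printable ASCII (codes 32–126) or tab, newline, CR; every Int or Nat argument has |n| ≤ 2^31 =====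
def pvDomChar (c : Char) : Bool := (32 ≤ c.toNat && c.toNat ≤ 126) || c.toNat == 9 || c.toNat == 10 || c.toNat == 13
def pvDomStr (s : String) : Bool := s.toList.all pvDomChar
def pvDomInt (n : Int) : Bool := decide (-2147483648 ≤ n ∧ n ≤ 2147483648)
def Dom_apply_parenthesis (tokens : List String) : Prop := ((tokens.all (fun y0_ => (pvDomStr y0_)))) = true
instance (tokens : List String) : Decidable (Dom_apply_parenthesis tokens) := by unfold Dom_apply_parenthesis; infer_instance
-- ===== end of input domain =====

-- B replaces A's nested scans by a single pass checking the width-3 window directly; simpler, return values proved identical.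

-- ===== PORT A =====
-- inner loop: 'for j in range(i+2, len(tokens)): ...' (indices i, j are in range, so pyGetD is exact)
def pvInnerA (tokens : List String) (i j : Nat) : Option (List String) :=
  if _h : j < tokens.length then
    if PySem.List.pyGetD tokens (j : Int) "" = ")" then
      let subexpr := PySem.List.slice tokens (some ((i : Int) + 1)) (some (j : Int))
      if subexpr.length = 1 then
        some (PySem.List.slice tokens none (some (i : Int)) ++ subexpr ++
              PySem.List.slice tokens (some ((j : Int) + 1)) none)
      else pvInnerA tokens i (j + 1)
    else pvInnerA tokens i (j + 1)
  else none
termination_by tokens.length - j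

-- outer loop: 'for i in range(len(tokens)): ...'; falling through the inner loop continues the outer one
def pvOuterA (tokens : List String) (i : Nat) : Option (List String) :=
  if _h : i < tokens.length then
    if PySem.List.pyGetD tokens (i : Int) "" = "(" then
      match pvInnerA tokens i (i + 2) with
      | some r => some r
      | none => pvOuterA tokens (i + 1)
    else pvOuterA tokens (i + 1)
  else none
termination_by tokens.length - i

def apply_parenthesis (tokens : List String) : Option (List String) :=
  pvOuterA tokens 0

-- ===== PORT B =====
-- 'for i in range(len(tokens) - 2): ...' single pass (indices in range, so pyGetD is exact)
def pvScanB (tokens : List String) (i : Nat) : Option (List String) :=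
  if _h : i < tokens.length - 2 then
    if PySem.List.pyGetD tokens (i : Int) "" = "(" ∧
       PySem.List.pyGetD tokens ((i : Int) + 2) "" = ")" then
      some (PySem.List.slice tokens none (some (i : Int)) ++
            [PySem.List.pyGetD tokens ((i : Int) + 1) ""] ++
            PySem.List.slice tokens (some ((i : Int) + 3)) none)
    else pvScanB tokens (i + 1)
  else none
termination_by tokens.length - 2 - i

def apply_parenthesis_alt (tokens : List String) : Option (List String) :=
  pvScanB tokens 0

-- ===== PRECONDITION & SPEC =====
def Spec_apply_parenthesis (tokens : List String) (out : Option (List String)) : Prop := out = apply_parenthesis_alt tokens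
instance (tokens : List String) (out : Option (List String)) : Decidable (Spec_apply_parenthesis tokens out) := by unfold Spec_apply_parenthesis; infer_instance

-- ===== CLAIM (what is proved, stated in full; the proofs are below) =====
def Claim_equal_apply_parenthesis : Prop := ∀ (tokens : List String), Dom_apply_parenthesis tokens → Spec_apply_parenthesis tokens (apply_parenthesis tokens)

-- ===== LEMMAS AND PROOFS =====

-- past the end of the list the inner loop returns none
theorem pvInnerA_of_ge (tokens : List String) (i j : Nat) (h : tokens.length ≤ j) :
    pvInnerA tokens i j = none := by
  unfold pvInnerA
  simp [Nat.not_lt.mpr h]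

-- once j ≥ i+3 every slice tokens[i+1:j] the inner loop tests has length ≥ 2, so it never returns
theorem pvInnerA_dead (tokens : List String) (i j : Nat) (h : i + 3 ≤ j) :
    pvInnerA tokens i j = none := by
  by_cases hj : j < tokens.length
  · unfold pvInnerA
    have hlen : (PySem.List.slice tokens (some ((i : Int) + 1)) (some (j : Int))).length ≠ 1 := by
      have h1 : ((i : Int) + 1) = ((i + 1 : Nat) : Int) := by push_cast; ring
      rw [h1, PySem.List.slice_natCast]
      simp only [List.length_take, List.length_drop]
      omega
    simp only [hj, dif_pos, hlen, if_false]
    split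
    · exact pvInnerA_dead tokens i (j + 1) (by omega)
    · exact pvInnerA_dead tokens i (j + 1) (by omega)
  · exact pvInnerA_of_ge tokens i j (by omega)
termination_by tokens.length - j

-- the inner loop started at i+2 (in range) succeeds iff tokens[i+2] = ')'
theorem pvInnerA_start (tokens : List String) (i : Nat) (h : i + 2 < tokens.length) :
    pvInnerA tokens i (i + 2) =
      if PySem.List.pyGetD tokens ((i : Int) + 2) "" = ")" then
        some (PySem.List.slice tokens none (some (i : Int)) ++
              [PySem.List.pyGetD tokens ((i : Int) + 1) ""] ++
              PySem.List.slice tokens (some ((i : Int) + 3)) none)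
      else none := by
  have hc2 : ((i + 2 : Nat) : Int) = (i : Int) + 2 := by push_cast; ring
  have h1 : (i : Int) + 1 = ((i + 1 : Nat) : Int) := by push_cast; ring
  have hd : tokens.drop (i + 1) = tokens[i + 1] :: tokens.drop (i + 2) :=
    List.drop_eq_getElem_cons (by omega)
  have he : i + 2 - (i + 1) = 1 := by omega
  have hsub : PySem.List.slice tokens (some ((i : Int) + 1)) (some ((i : Int) + 2)) =
      [PySem.List.pyGetD tokens ((i : Int) + 1) ""] := by
    rw [h1, ← hc2, PySem.List.slice_natCast, PySem.List.pyGetD_natCast, he, hd,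
      List.take_succ_cons, List.take_zero, List.getD_eq_getElem?_getD,
      List.getElem?_eq_getElem (show i + 1 < tokens.length by omega)]
    rfl
  rw [pvInnerA]
  simp only [h, dif_pos, hc2, hsub, List.length_singleton]
  split
  · have hc3 : (i : Int) + 2 + 1 = (i : Int) + 3 := by ring
    simp [hc3]
  · exact pvInnerA_dead tokens i (i + 3) (by omega)

-- the two loops agree from every start index
theorem pvOuterA_eq_pvScanB (tokens : List String) (i : Nat) :
    pvOuterA tokens i = pvScanB tokens i := by
  by_cases hi : i < tokens.length
  · rw [pvOuterA, pvScanB]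
    by_cases h2 : i < tokens.length - 2
    · have hr : i + 2 < tokens.length := by omega
      simp only [hi, dif_pos, h2]
      by_cases hop : PySem.List.pyGetD tokens (i : Int) "" = "("
      · rw [pvInnerA_start tokens i hr]
        by_cases hcl : PySem.List.pyGetD tokens ((i : Int) + 2) "" = ")"
        · simp [hop, hcl]
        · simp only [hcl, hop, if_pos, and_false, if_false]
          exact pvOuterA_eq_pvScanB tokens (i + 1)
      · simp only [hop, if_false, false_and]
        exact pvOuterA_eq_pvScanB tokens (i + 1)
    · have hnone : pvInnerA tokens i (i + 2) = none :=
        pvInnerA_of_ge tokens i (i + 2) (by omega)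
      have hnext : pvScanB tokens (i + 1) = none := by
        rw [pvScanB]; simp; omega
      have htail : pvOuterA tokens (i + 1) = none := by
        rw [pvOuterA_eq_pvScanB tokens (i + 1)]; exact hnext
      simp only [hi, dif_pos, h2, hnone, htail]
      split <;> simp
  · rw [pvOuterA, pvScanB]
    simp only [dif_neg hi]
    simp; omega
termination_by tokens.length - i

-- ===== VERDICT (by name: the statement is the Claim_ definition above) =====
theorem apply_parenthesis_spec : Claim_equal_apply_parenthesis := by
  intro tokens _
  unfold Spec_apply_parenthesis apply_parenthesis apply_parenthesis_alt
  exact pvOuterA_eq_pvScanB tokens 0
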